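-- pv_equiv track=rewrite | github.com/MediaMonitoringAndAnalysis/EntryExtraction | setfit_extraction.py | _group_indices_by_value
-- ===== SOURCE A (Python) =====
-- from typing import List, Tuple
-- from itertools import groupby
--
-- def _group_indices_by_value(lst: List[int], value=1) -> List[List[int]]:
--     groups = []
--     for key, group in groupby(enumerate(lst), lambda x: x[1] == value):
--         if (
--             key
--         ):  # Only process groups where the value is equal to the specified value (1)
--             indices = [index for index, _ in group]
--
--             groups.append(indices)
--     return groups
-- ===== SOURCE B (Python) =====
-- from typing import List
--
-- def _group_indices_by_value(lst: List[int], value=1) -> List[List[int]]: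
--     matched = [i for i, x in enumerate(lst) if x == value]
--     groups = []
--     cur = []
--     for j in matched:
--         if cur and j != cur[-1] + 1:
--             groups.append(cur)
--             cur = [j]
--         else:
--             cur = cur + [j]
--     if cur:
--         groups.append(cur)
--     return groups
-- ===== Notes on version B (the rewrite author's own statement) =====
-- stated objective: alternative
-- what changed: B first extracts the flat list of matching indices with one comprehension and then splits it into runs by index gaps (j != prev+1), instead of A's groupby over (index, element) pairs keyed on element equality.
import Mathlib
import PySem

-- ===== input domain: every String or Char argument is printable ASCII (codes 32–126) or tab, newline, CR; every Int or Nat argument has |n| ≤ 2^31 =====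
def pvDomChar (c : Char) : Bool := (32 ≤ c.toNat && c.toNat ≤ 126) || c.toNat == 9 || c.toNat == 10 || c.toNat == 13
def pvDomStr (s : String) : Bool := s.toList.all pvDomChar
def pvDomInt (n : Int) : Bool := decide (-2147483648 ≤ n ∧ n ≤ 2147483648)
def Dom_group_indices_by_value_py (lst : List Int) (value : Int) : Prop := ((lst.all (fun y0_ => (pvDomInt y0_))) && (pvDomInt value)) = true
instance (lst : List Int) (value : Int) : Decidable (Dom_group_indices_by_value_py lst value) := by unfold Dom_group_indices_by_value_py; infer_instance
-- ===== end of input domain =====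

-- B extracts the flat list of matching indices and splits it by index gaps, instead of A's groupby keyed on element equality; alternative decomposition, same cost.


-- ===== PORT A =====
-- A iterates over groupby(enumerate(lst), x[1]==value): the loop below walks the
-- (index, element) pairs maintaining the current key-true group `cur` and the
-- accumulated `groups`; a key-false pair closes the current group (kept iff the
-- key was true, i.e. `cur` nonempty), end of input closes the last group.
def pvALoop (pairs : List (Int × Int)) (value : Int) (cur : List Int)
    (groups : List (List Int)) : List (List Int) :=
  match pairs with
  | [] => if cur = [] then groups else groups ++ [cur]
  | (i, x) :: rest =>
      if x = value then pvALoop rest value (cur ++ [i]) groups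
      else pvALoop rest value [] (if cur = [] then groups else groups ++ [cur])

def group_indices_by_value_py (lst : List Int) (value : Int) : List (List Int) :=
  pvALoop (PySem.List.enumerate lst) value [] []

-- ===== PORT B =====
-- B's loop over the flat `matched` list: close the current run when the next
-- matched index is not the previous one plus 1.
def pvBLoop (matched : List Int) (cur : List Int)
    (groups : List (List Int)) : List (List Int) :=
  match matched with
  | [] => if cur = [] then groups else groups ++ [cur]
  | j :: rest =>
      match cur.getLast? with
      | some p =>
          if j ≠ p + 1 then pvBLoop rest [j] (groups ++ [cur])
          else pvBLoop rest (cur ++ [j]) groups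
      | none => pvBLoop rest (cur ++ [j]) groups

def group_indices_by_value_py_alt (lst : List Int) (value : Int) : List (List Int) :=
  let matched := (PySem.List.enumerate lst).filterMap
    (fun p => if p.2 = value then some p.1 else none)
  pvBLoop matched [] []

-- ===== PRECONDITION & SPEC =====
def Spec_group_indices_by_value_py (lst : List Int) (value : Int) (out : List (List Int)) : Prop := out = group_indices_by_value_py_alt lst value
instance (lst : List Int) (value : Int) (out : List (List Int)) : Decidable (Spec_group_indices_by_value_py lst value out) := by unfold Spec_group_indices_by_value_py; infer_instance

-- ===== CLAIM (what is proved, stated in full; the proofs are below) =====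
def Claim_equal_group_indices_by_value_py : Prop := ∀ (lst : List Int) (value : Int), Dom_group_indices_by_value_py lst value → Spec_group_indices_by_value_py lst value (group_indices_by_value_py lst value)

-- ===== LEMMAS AND PROOFS =====

-- every index produced by B's filter over pairs enumerated from n is ≥ n
theorem pv_mem_filter_ge (lst : List Int) (value n : Int) :
    ∀ j ∈ (PySem.List.enumerate lst n).filterMap
        (fun p => if p.2 = value then some p.1 else none), n ≤ j := by
  induction lst generalizing n with
  | nil => simp [PySem.List.enumerate_nil]
  | cons x xs ih =>
      intro j hj
      rw [PySem.List.enumerate_cons] at hj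
      simp only [List.filterMap_cons] at hj
      by_cases hx : x = value
      · simp only [hx, if_true] at hj
        rcases List.mem_cons.mp hj with h | h
        · omega
        · have := ih (n + 1) j h; omega
      · simp only [if_neg hx] at hj
        have := ih (n + 1) j hj; omega

-- closing a stale run: if every upcoming index skips p+1, B's loop with a
-- nonempty current run ending at p equals the loop restarted after closing it
theorem pv_close (js : List Int) (p : Int) (cur : List Int) (groups : List (List Int))
    (hne : cur ≠ []) (hlast : cur.getLast? = some p)
    (hgt : ∀ j ∈ js, p + 1 < j) :
    pvBLoop js cur groups = pvBLoop js [] (groups ++ [cur]) := by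
  cases js with
  | nil => simp [pvBLoop, hne]
  | cons j rest =>
      have hj : p + 1 < j := hgt j (List.mem_cons_self ..)
      simp [pvBLoop, hlast, show j ≠ p + 1 by omega]

-- main invariant: over pairs enumerated from n, with the current run empty or
-- ending at n-1, A's loop equals B's loop on the filtered indices
theorem pv_main (lst : List Int) (value n : Int) (cur : List Int)
    (groups : List (List Int))
    (h : cur = [] ∨ cur.getLast? = some (n - 1)) :
    pvALoop (PySem.List.enumerate lst n) value cur groups =
      pvBLoop ((PySem.List.enumerate lst n).filterMap
        (fun p => if p.2 = value then some p.1 else none)) cur groups := by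
  induction lst generalizing n cur groups with
  | nil => simp [PySem.List.enumerate_nil, pvALoop, pvBLoop]
  | cons x xs ih =>
      rw [PySem.List.enumerate_cons]
      simp only [List.filterMap_cons]
      by_cases hx : x = value
      · simp only [pvALoop, hx, if_true]
        have hstep : pvBLoop (n :: (PySem.List.enumerate xs (n + 1)).filterMap
            (fun p => if p.2 = value then some p.1 else none)) cur groups =
            pvBLoop ((PySem.List.enumerate xs (n + 1)).filterMap
              (fun p => if p.2 = value then some p.1 else none)) (cur ++ [n]) groups := by
          rcases h with h | h
          · simp [pvBLoop, h]
          · simp [pvBLoop, h]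
        rw [hstep]
        exact ih (n + 1) (cur ++ [n]) groups (Or.inr (by simp))
      · simp only [pvALoop, hx, if_false]
        rw [ih (n + 1) [] _ (Or.inl rfl)]
        rcases h with h | h
        · simp [h]
        · have hne : cur ≠ [] := by
            intro hc; rw [hc] at h; simp at h
          rw [if_neg hne]
          exact (pv_close _ (n - 1) cur groups hne h
            (fun j hj => by have := pv_mem_filter_ge xs value (n + 1) j hj; omega)).symm

-- ===== VERDICT (by name: the statement is the Claim_ definition above) =====
theorem group_indices_by_value_py_spec : Claim_equal_group_indices_by_value_py := by
  intro lst value _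
  unfold Spec_group_indices_by_value_py group_indices_by_value_py group_indices_by_value_py_alt
  exact pv_main lst value 0 [] [] (Or.inl rfl)
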